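-- pv_equiv track=rewrite | github.com/eric431/Coding-Challenges | HighestNumericalDigit.py | solution
-- ===== SOURCE A (Python) =====
-- def solution(input):
--     m1 = None
--     m2 = None
--     num = []
--     hashMap = {}
--     if (len(input) < 2):
--         return -1
--
--     for i in input:
--         if i.isnumeric():
--             num.append(int(i))
--
--
--     if len(num) < 2:
--         return -1
--     else:
--         for r in num:
--             if m1 == None:
--                 m1 = r
--             elif r <= m1 and m2 == None:
--                 m2 = r
--             elif r > m1:
--                 temp = m1
--                 m1 = r
--                 m2 = temp
--             elif r > m2:
--                 m2 = r
--     return m2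
-- ===== SOURCE B (Python) =====
-- def solution(input):
--     digits = sorted((int(c) for c in input if c.isnumeric()), reverse=True)
--     if len(digits) < 2:
--         return -1
--     return digits[1]
-- ===== Notes on version B (the rewrite author's own statement) =====
-- stated objective: simpler
-- what changed: Replaces the manual m1/m2 single-pass top-two selection (plus a redundant len(input)<2 guard) with extract-digits, sort descending, index 1.
import Mathlib
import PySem

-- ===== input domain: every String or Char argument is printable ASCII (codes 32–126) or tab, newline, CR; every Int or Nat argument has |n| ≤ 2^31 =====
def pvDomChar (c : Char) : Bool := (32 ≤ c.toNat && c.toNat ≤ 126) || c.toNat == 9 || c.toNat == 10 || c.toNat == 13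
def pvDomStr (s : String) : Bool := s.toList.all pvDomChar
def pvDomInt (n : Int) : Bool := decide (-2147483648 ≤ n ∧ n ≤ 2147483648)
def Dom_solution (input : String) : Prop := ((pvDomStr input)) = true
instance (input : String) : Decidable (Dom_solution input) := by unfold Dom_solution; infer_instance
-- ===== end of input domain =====

-- B replaces A's manual m1/m2 running top-two selection with extract digits, sort descending, take index 1 (simpler).

-- ===== PORT A =====
-- A's loop body over the digit list: state = (m1, m2), both Optional.
-- The `none` case of m2 in the last branch is unreachable (whenever that branch runs m2 has
-- been set); in Python `r > None` would raise, but no input reaches it, so the state is kept.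
def stepA (p : Option Int × Option Int) (r : Int) : Option Int × Option Int :=
  match p.1 with
  | none => (some r, p.2)
  | some a =>
    if r ≤ a ∧ p.2 = none then (p.1, some r)
    else if a < r then (some r, some a)
    else match p.2 with
      | some b => if b < r then (p.1, some r) else p
      | none => p

-- i.isnumeric() and int(i) are exact on the printable-ASCII domain: isnumeric = '0'..'9',
-- int(i) = code − 48.
def solution (input : String) : Int :=
  if input.toList.length < 2 then -1
  else
    let num := input.toList.foldl
      (fun acc c => if PySem.Chars.isdigit c then acc ++ [((c.toNat : Int) - 48)] else acc) []
    if num.length < 2 then -1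
    else
      -- final `return m2`; m2 = none is unreachable here since num has ≥ 2 elements
      ((num.foldl stepA (none, none)).2).getD (-1)

-- ===== PORT B =====
def solution_alt (input : String) : Int :=
  let digits := (input.toList.filter (fun c => PySem.Chars.isdigit c)).map
    (fun c => ((c.toNat : Int) - 48))
  let s := PySem.List.sorted digits (fun x => x) true
  if s.length < 2 then -1
  else (PySem.List.pyGet? s 1).getD (-1)   -- index 1 is in range: s.length ≥ 2

-- ===== PRECONDITION & SPEC =====
def Spec_solution (input : String) (out : Int) : Prop := out = solution_alt input
instance (input : String) (out : Int) : Decidable (Spec_solution input out) := by unfold Spec_solution; infer_instance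

-- ===== CLAIM (what is proved, stated in full; the proofs are below) =====
def Claim_equal_solution : Prop := ∀ (input : String), Dom_solution input → Spec_solution input (solution input)

-- ===== LEMMAS AND PROOFS =====

-- A's append-fold builds exactly B's filter-then-map digit list.
theorem foldl_digits (l : List Char) (acc : List Int) :
    l.foldl (fun acc c => if PySem.Chars.isdigit c then acc ++ [((c.toNat : Int) - 48)] else acc) acc
      = acc ++ (l.filter (fun c => PySem.Chars.isdigit c)).map (fun c => ((c.toNat : Int) - 48)) := by
  induction l generalizing acc with
  | nil => simp
  | cons c t ih =>
    simp only [List.foldl_cons, List.filter_cons]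
    by_cases h : PySem.Chars.isdigit c = true
    · simp [h, ih]
    · simp [h, ih]

-- Antisymmetry of (· ≥ ·) on Int: two lists sorted by it and permutations of each other are equal.
theorem perm_pairwise_ge_eq {l₁ l₂ : List Int}
    (p1 : List.Pairwise (fun a b : Int => a ≥ b) l₁)
    (p2 : List.Pairwise (fun a b : Int => a ≥ b) l₂) (h : l₁.Perm l₂) : l₁ = l₂ :=
  List.Perm.eq_of_pairwise (fun _ _ _ _ hab hba => le_antisymm hba hab) p1 p2 h

-- PySem's descending sort is the Mathlib insertion sort by (· ≥ ·).
theorem pysorted_eq_insertionSort (l : List Int) :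
    PySem.List.sorted l (fun x => x) true = List.insertionSort (fun a b : Int => a ≥ b) l := by
  exact perm_pairwise_ge_eq (PySem.List.sorted_pairwise_rev l (fun x => x))
    (List.pairwise_insertionSort _ l)
    ((PySem.List.sorted_perm l (fun x => x) true).trans (List.perm_insertionSort _ l).symm)

theorem insertionSort_append_singleton (l : List Int) (x : Int) :
    List.insertionSort (fun a b : Int => a ≥ b) (l ++ [x])
      = List.orderedInsert (fun a b : Int => a ≥ b) x
          (List.insertionSort (fun a b : Int => a ≥ b) l) := by
  refine perm_pairwise_ge_eq (List.pairwise_insertionSort _ _)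
    ((List.pairwise_insertionSort _ l).orderedInsert x _) ?_
  exact (List.perm_insertionSort _ _).trans
    ((List.perm_append_singleton x l).trans
      ((List.Perm.cons x (List.perm_insertionSort _ l)).symm)) |>.trans
    (List.perm_orderedInsert _ x _).symm

-- A's step applied to the top two of a (descending-)sorted list is the top two after insertion.
theorem stepA_orderedInsert (s : List Int) (x : Int)
    (hs : List.Pairwise (fun a b : Int => a ≥ b) s) :
    stepA (s[0]?, s[1]?) x
      = ((List.orderedInsert (fun a b : Int => a ≥ b) x s)[0]?,
         (List.orderedInsert (fun a b : Int => a ≥ b) x s)[1]?) := by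
  match s with
  | [] => simp [stepA, List.orderedInsert]
  | [a] =>
    simp only [stepA, List.orderedInsert]
    split_ifs <;>
      first
        | rfl
        | omega
        | (simp_all <;> omega)
        | (simp_all <;> split_ifs <;> simp_all <;> omega)
  | a :: b :: t =>
    have hab : b ≤ a := List.rel_of_pairwise_cons hs (by simp)
    simp only [stepA, List.orderedInsert]
    split_ifs <;>
      first
        | rfl
        | omega
        | (simp_all <;> omega)
        | (simp_all <;> split_ifs <;> simp_all <;> omega)

theorem foldl_stepA (l : List Int) :
    l.foldl stepA (none, none)
      = ((List.insertionSort (fun a b : Int => a ≥ b) l)[0]?,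
         (List.insertionSort (fun a b : Int => a ≥ b) l)[1]?) := by
  induction l using List.reverseRecOn with
  | nil => simp [List.insertionSort]
  | append_singleton p x ih =>
    rw [List.foldl_append, List.foldl_cons, List.foldl_nil, ih,
      insertionSort_append_singleton]
    exact stepA_orderedInsert _ x (List.pairwise_insertionSort _ p)

-- ===== VERDICT (by name: the statement is the Claim_ definition above) =====
theorem solution_spec : Claim_equal_solution := by
  intro input _
  unfold Spec_solution solution solution_alt
  simp only [foldl_digits, List.nil_append, foldl_stepA, pysorted_eq_insertionSort]
  set d := (input.toList.filter (fun c => PySem.Chars.isdigit c)).map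
      (fun c => ((c.toNat : Int) - 48)) with hd
  have hlen : (List.insertionSort (fun a b : Int => a ≥ b) d).length = d.length :=
    (List.perm_insertionSort _ d).length_eq
  have hdle : d.length ≤ input.toList.length := by
    calc d.length = (input.toList.filter (fun c => PySem.Chars.isdigit c)).length := by
          simp [hd]
      _ ≤ input.toList.length := List.length_filter_le _ _
  by_cases h2 : d.length < 2
  · have hnone : (List.insertionSort (fun a b : Int => a ≥ b) d)[1]? = none := by
      apply List.getElem?_eq_none; omega
    by_cases h1 : input.toList.length < 2 <;> simp_all
  · have h1 : ¬ input.toList.length < 2 := by omega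
    have hget : PySem.List.pyGet? (List.insertionSort (fun a b : Int => a ≥ b) d) 1
        = (List.insertionSort (fun a b : Int => a ≥ b) d)[1]? := by
      simp [PySem.List.pyGet?, PySem.List.pyIdx?, (by omega : 1 < d.length)]
    simp_all
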